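-- pv_equiv track=rewrite | github.com/GustavoSanchezOrtiz/Actividad05 | src/isbn.py | normalize_isbn
-- ===== SOURCE A (Python) =====
-- def normalize_isbn(cadena):
--     # Quitar espacios y guiones "-"
--     cadena = cadena.replace("-","")
--     cadena_split = cadena.split()
--     cadena_limpia = "".join(cadena_split) # El método split y join asegura que se eliminen todo tipo de espacios
--
--     # Validar que solo haya dígitos(0-9), permitiendo una 'X' como último carácter
--     error = "" # Cadena vacía en caso de error
--     validar = True # Bandera que controla el flujo
--     digitos = ["0","1","2","3","4","5","6","7","8","9"] # Lista de dígitos aceptados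
--
--     if not cadena_limpia: # Verifica que la cadena no esté vacía
--         validar = False
--     else:
--         for caracter in cadena_limpia[:-1]: # Itera sobre todos los caracteres de la cadena excepto el último
--             if caracter not in digitos: # Verifica si el carácter es inválido
--                 validar = False
--                 break
--
--         if validar:
--             ultimo_digito = cadena_limpia[-1].upper() # Guarda el último dígito de la cadena
--             if ultimo_digito not in digitos and ultimo_digito != "X": # verifica que el último dígito no esté entre 0-9 y que no sea una "X"
--                 validar = False
--
--     # Resultado
--     if validar:
--         return cadena_limpia.upper() # Regresa la cadena normalizada
--     else:
--         return error # Regresa una cadena vacía en caso de error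
-- ===== SOURCE B (Python) =====
-- import re
--
-- _ISBN_RE = re.compile(r'[0-9]*[0-9Xx]')
--
-- def normalize_isbn(cadena):
--     # Keep A's cleaning, then validate with a single regex instead of a flag loop:
--     # ASCII digits for all but the last char, digit or x/X for the last; the
--     # pattern needs at least one character, so the empty string is rejected.
--     cadena_limpia = "".join(cadena.replace("-", "").split())
--     if _ISBN_RE.fullmatch(cadena_limpia):
--         return cadena_limpia.upper()
--     return ""
-- ===== Notes on version B (the rewrite author's own statement) =====
-- stated objective: idiomatic
-- what changed: Replaces A's flag-controlled validation loop plus last-character branch with a single compiled regex fullmatch r'[0-9]*[0-9Xx]' (a declarative pattern run by the regex engine instead of explicit character iteration); the cleaning step is kept.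
import Mathlib
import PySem

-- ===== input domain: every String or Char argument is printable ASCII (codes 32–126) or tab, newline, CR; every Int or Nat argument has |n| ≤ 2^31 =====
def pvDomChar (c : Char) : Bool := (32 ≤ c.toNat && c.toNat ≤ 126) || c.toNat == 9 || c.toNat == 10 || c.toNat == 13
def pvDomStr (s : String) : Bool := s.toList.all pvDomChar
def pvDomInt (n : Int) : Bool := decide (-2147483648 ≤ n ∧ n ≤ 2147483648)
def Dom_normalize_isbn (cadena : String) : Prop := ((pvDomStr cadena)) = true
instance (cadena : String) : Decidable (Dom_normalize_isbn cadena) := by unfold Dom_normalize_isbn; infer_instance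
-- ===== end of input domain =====

-- B keeps A's cleaning but replaces the flag-controlled validation loop and
-- last-character branch with one regex fullmatch [0-9]*[0-9Xx] (idiomatic, same cost).


-- ===== PORT A =====
-- digitos = ["0",...,"9"]: a list of 1-char strings compared with 1-char strings;
-- ported as the corresponding List Char (exact: both compare single code points)
def pvDigits : List Char := ['0','1','2','3','4','5','6','7','8','9']

-- the 'for caracter in cadena_limpia[:-1]' flag loop with its break
def pvALoop : List Char → Bool
  | [] => true
  | c :: rest => if !(pvDigits.contains c) then false else pvALoop rest

def normalize_isbn (cadena : String) : String :=
  let cadena2 := PySem.Chars.replace cadena.toList ['-'] []        -- cadena.replace("-","")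
  let cadena_split := PySem.Chars.split₀ cadena2                   -- cadena.split()
  let cadena_limpia := PySem.Chars.join [] cadena_split            -- "".join(cadena_split)
  let validar : Bool :=
    if cadena_limpia.isEmpty then false
    else
      let v := pvALoop (PySem.List.slice cadena_limpia none (some (-1)))
      if v then
        match PySem.List.pyGet? cadena_limpia (-1) with            -- cadena_limpia[-1]
        | some c =>
          let ultimo_digito := PySem.Chars.upperChar c
          if !(pvDigits.contains ultimo_digito) && !(ultimo_digito == 'X') then false else true
        | none => false                                            -- unreachable: nonempty here
      else false
  if validar then String.ofList (PySem.Chars.upper cadena_limpia) else ""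

-- ===== PORT B =====
-- re.fullmatch with a character-class pattern, ported through Mathlib's
-- RegularExpression and its executable full matcher `rmatch`.
-- A character class [c1..ck] is the alternation char c1 + ... + char ck.
def pvClass (l : List Char) : RegularExpression Char :=
  l.foldr (fun c r => RegularExpression.char c + r) 0

-- the compiled pattern  r'[0-9]*[0-9Xx]'  (the digit class reuses the list pvDigits)
def pvPattern : RegularExpression Char :=
  (pvClass pvDigits).star * pvClass (pvDigits ++ ['X','x'])

def normalize_isbn_alt (cadena : String) : String :=
  let cadena_limpia := PySem.Chars.join []
    (PySem.Chars.split₀ (PySem.Chars.replace cadena.toList ['-'] []))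
  if pvPattern.rmatch cadena_limpia then String.ofList (PySem.Chars.upper cadena_limpia)
  else ""

-- ===== PRECONDITION & SPEC =====
def Spec_normalize_isbn (cadena : String) (out : String) : Prop := out = normalize_isbn_alt cadena
instance (cadena : String) (out : String) : Decidable (Spec_normalize_isbn cadena out) := by unfold Spec_normalize_isbn; infer_instance

-- ===== CLAIM (what is proved, stated in full; the proofs are below) =====
def Claim_equal_normalize_isbn : Prop := ∀ (cadena : String), Dom_normalize_isbn cadena → Spec_normalize_isbn cadena (normalize_isbn cadena)

-- ===== LEMMAS AND PROOFS =====

-- a character class matches exactly the one-character strings over its list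
theorem pv_class_rmatch (l : List Char) (x : List Char) :
    (pvClass l).rmatch x = true ↔ ∃ c ∈ l, x = [c] := by
  induction l with
  | nil =>
    simp only [pvClass, List.foldr_nil, List.not_mem_nil, false_and, exists_false, iff_false]
    simp [RegularExpression.zero_rmatch]
  | cons a t ih =>
    have hadd := RegularExpression.add_rmatch_iff (RegularExpression.char a) (pvClass t) x
    constructor
    · intro h
      rcases hadd.mp h with h1 | h2
      · exact ⟨a, List.mem_cons_self, (RegularExpression.char_rmatch_iff a x).mp h1⟩
      · obtain ⟨c, hc, rfl⟩ := ih.mp h2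
        exact ⟨c, List.mem_cons_of_mem _ hc, rfl⟩
    · rintro ⟨c, hc, rfl⟩
      rcases List.mem_cons.mp hc with rfl | hc
      · exact hadd.mpr (Or.inl ((RegularExpression.char_rmatch_iff c [c]).mpr rfl))
      · exact hadd.mpr (Or.inr (ih.mpr ⟨c, hc, rfl⟩))

-- the starred class matches exactly the strings all of whose characters are in the list
theorem pv_star_class_rmatch (l : List Char) (x : List Char) :
    ((pvClass l).star.rmatch x = true) ↔ ∀ c ∈ x, c ∈ l := by
  rw [RegularExpression.star_rmatch_iff]
  constructor
  · rintro ⟨S, rfl, hS⟩ c hc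
    obtain ⟨t, htS, hct⟩ := List.mem_flatten.mp hc
    obtain ⟨d, hd, rfl⟩ := (pv_class_rmatch l t).mp (hS t htS).2
    rw [List.mem_singleton.mp hct]; exact hd
  · intro h
    refine ⟨x.map (fun c => [c]), ?_, ?_⟩
    · induction x with
      | nil => rfl
      | cons a t iht =>
        simpa using iht (fun c hc => h c (List.mem_cons_of_mem a hc))
    · intro t ht
      obtain ⟨c, hc, rfl⟩ := List.mem_map.mp ht
      exact ⟨by simp, (pv_class_rmatch l [c]).mpr ⟨c, h c hc, rfl⟩⟩

-- full characterization of the pattern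
theorem pv_pattern_rmatch (t : List Char) :
    pvPattern.rmatch t = true ↔
      ∃ u c, t = u ++ [c] ∧ (∀ d ∈ u, d ∈ pvDigits) ∧ c ∈ pvDigits ++ ['X','x'] := by
  rw [pvPattern, RegularExpression.mul_rmatch_iff]
  constructor
  · rintro ⟨u, v, rfl, hu, hv⟩
    obtain ⟨c, hc, rfl⟩ := (pv_class_rmatch _ v).mp hv
    exact ⟨u, c, rfl, (pv_star_class_rmatch _ u).mp hu, hc⟩
  · rintro ⟨u, c, rfl, hu, hc⟩
    exact ⟨u, [c], rfl, (pv_star_class_rmatch _ u).mpr hu, (pv_class_rmatch _ _).mpr ⟨c, hc, rfl⟩⟩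

-- character-level facts
theorem pv_beq_char_toNat (c d : Char) : (c == d) = decide (c.toNat = d.toNat) := by
  rw [Bool.eq_iff_iff, beq_iff_eq, decide_eq_true_eq]
  exact ⟨fun e => e ▸ rfl, fun hn => Char.ext (UInt32.toNat_inj.mp hn)⟩

-- A's test on the uppercased last character accepts exactly the class [0-9Xx]
theorem pv_last_char (c : Char) :
    (pvDigits.contains (PySem.Chars.upperChar c) || (PySem.Chars.upperChar c == 'X'))
      = (pvDigits ++ ['X','x']).contains c := by
  simp only [PySem.Chars.upperChar, PySem.Chars.islower]
  by_cases h : ('a' ≤ c ∧ c ≤ 'z')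
  · rw [if_pos (by simp [h.1, h.2])]
    have hb : 97 ≤ c.toNat ∧ c.toNat ≤ 122 := by
      have h1 := h.1; have h2 := h.2
      rw [Char.le_def, UInt32.le_iff_toNat_le] at h1 h2
      exact ⟨h1, h2⟩
    have hv : (c.toNat - 32).isValidChar := Or.inl (by omega)
    have hu : (Char.ofNat (c.toNat - 32)).toNat = c.toNat - 32 := by
      rw [Char.toNat_ofNat, if_pos hv]
    simp only [pvDigits, List.cons_append, List.nil_append,
      List.contains_cons, List.contains_nil, Bool.or_false, pv_beq_char_toNat, hu]
    rw [Bool.eq_iff_iff]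
    simp only [Bool.or_eq_true, decide_eq_true_eq,
      show '0'.toNat = 48 from rfl, show '1'.toNat = 49 from rfl, show '2'.toNat = 50 from rfl,
      show '3'.toNat = 51 from rfl, show '4'.toNat = 52 from rfl, show '5'.toNat = 53 from rfl,
      show '6'.toNat = 54 from rfl, show '7'.toNat = 55 from rfl, show '8'.toNat = 56 from rfl,
      show '9'.toNat = 57 from rfl, show 'X'.toNat = 88 from rfl, show 'x'.toNat = 120 from rfl]
    omega
  · rw [if_neg (by
      simp only [Bool.and_eq_true, decide_eq_true_eq]
      exact fun hh => h hh)]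
    have hb : ¬(97 ≤ c.toNat ∧ c.toNat ≤ 122) := by
      intro hh
      exact h ⟨by rw [Char.le_def, UInt32.le_iff_toNat_le]; exact hh.1,
               by rw [Char.le_def, UInt32.le_iff_toNat_le]; exact hh.2⟩
    simp only [pvDigits, List.cons_append, List.nil_append,
      List.contains_cons, List.contains_nil, Bool.or_false, pv_beq_char_toNat]
    rw [Bool.eq_iff_iff]
    simp only [Bool.or_eq_true, decide_eq_true_eq,
      show '0'.toNat = 48 from rfl, show '1'.toNat = 49 from rfl, show '2'.toNat = 50 from rfl,
      show '3'.toNat = 51 from rfl, show '4'.toNat = 52 from rfl, show '5'.toNat = 53 from rfl,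
      show '6'.toNat = 54 from rfl, show '7'.toNat = 55 from rfl, show '8'.toNat = 56 from rfl,
      show '9'.toNat = 57 from rfl, show 'X'.toNat = 88 from rfl, show 'x'.toNat = 120 from rfl]
    omega

theorem pv_aloop_all (l : List Char) :
    pvALoop l = l.all (fun c => pvDigits.contains c) := by
  induction l with
  | nil => rfl
  | cons c t ih =>
    rw [pvALoop, List.all_cons, ih]
    cases pvDigits.contains c <;> rfl

-- membership in the digit class vs the Bool `contains` test
theorem pv_mem_digits (d : Char) : (d ∈ pvDigits) ↔ pvDigits.contains d = true := by
  simp [pvDigits]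

-- the regex on a nonempty string, as the boolean A computes
theorem pv_pattern_bool (a : Char) (l : List Char) (x : Char)
    (hx : (a :: l).getLast? = some x) :
    pvPattern.rmatch (a :: l)
      = ((a :: l).dropLast.all (fun c => pvDigits.contains c)
          && (pvDigits.contains (PySem.Chars.upperChar x) || (PySem.Chars.upperChar x == 'X'))) := by
  have hsplit : (a :: l).dropLast ++ [x] = a :: l := List.dropLast_append_getLast? x hx
  rw [Bool.eq_iff_iff, pv_pattern_rmatch, Bool.and_eq_true, List.all_eq_true, pv_last_char]
  constructor
  · rintro ⟨u, c, heq, hu, hc⟩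
    have h2 := List.append_inj' (hsplit.trans heq) rfl
    have hx2 : x = c := by injection h2.2 with h3 _
    refine ⟨fun d hd => (pv_mem_digits d).mp (hu d (h2.1 ▸ hd)), ?_⟩
    rw [hx2]; simpa using hc
  · rintro ⟨hall, hlast⟩
    refine ⟨(a :: l).dropLast, x, hsplit.symm,
      fun d hd => (pv_mem_digits d).mpr (hall d hd), by simpa using hlast⟩

-- A's validation flag equals the regex match, on the shared cleaned list
theorem pv_cond_eq (t : List Char) :
    (if t.isEmpty then false
     else
       if pvALoop (PySem.List.slice t none (some (-1))) then
         match PySem.List.pyGet? t (-1) with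
         | some c =>
           if !(pvDigits.contains (PySem.Chars.upperChar c)) && !(PySem.Chars.upperChar c == 'X')
           then false else true
         | none => false
       else false)
    = pvPattern.rmatch t := by
  cases t with
  | nil => simpa using (by decide : pvPattern.rmatch [] = false)
  | cons a l =>
    rw [PySem.List.slice_to_neg_one, PySem.List.pyGet?_neg_one]
    obtain ⟨x, hx⟩ : ∃ x, (a :: l).getLast? = some x :=
      Option.isSome_iff_exists.mp (List.getLast?_isSome.mpr (by simp))
    rw [hx]
    dsimp only
    rw [if_neg (by simp), pv_aloop_all, pv_pattern_bool a l x hx]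
    cases hall : (a :: l).dropLast.all (fun c => pvDigits.contains c) with
    | false => simp
    | true =>
      rw [if_pos rfl, Bool.true_and]
      cases hb : (pvDigits.contains (PySem.Chars.upperChar x) || (PySem.Chars.upperChar x == 'X')) with
      | false =>
        rcases Bool.or_eq_false_iff.mp hb with ⟨h1, h2⟩
        rw [h1, h2]; simp
      | true =>
        rcases Bool.or_eq_true_iff.mp hb with h1 | h1 <;> (rw [h1]; simp)

-- ===== VERDICT (by name: the statement is the Claim_ definition above) =====
theorem normalize_isbn_spec : Claim_equal_normalize_isbn := by
  intro cadena _
  unfold Spec_normalize_isbn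
  show normalize_isbn cadena = normalize_isbn_alt cadena
  simp only [normalize_isbn, normalize_isbn_alt]
  rw [pv_cond_eq]
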